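-- pv_equiv track=rewrite | github.com/JoeBusLife/python-ds-prac | 11_flip_case/flip_case.py | flip_case
-- ===== SOURCE A (Python) =====
-- def flip_case(phrase, to_swap):
--     """Flip [to_swap] case each time it appears in phrase.
--
--         >>> flip_case('Aaaahhh', 'a')
--         'aAAAhhh'
--
--         >>> flip_case('Aaaahhh', 'A')
--         'aAAAhhh'
--
--         >>> flip_case('Aaaahhh', 'h')
--         'AaaaHHH'
--
--     """
--     to_swap_low = to_swap.lower()
--     output = ""
--
--     for let in phrase:
--         if let.lower() == to_swap_low:
--             output += let.swapcase()
--         else: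
--             output += let
--
--     return output
-- ===== SOURCE B (Python) =====
-- def flip_case(phrase, to_swap):
--     """Flip [to_swap] case each time it appears in phrase (case-insensitive match)."""
--     tsl = to_swap.lower()
--     table = {ord(c): c.swapcase() for c in set(phrase) if c.lower() == tsl}
--     return phrase.translate(table)
-- ===== Notes on version B (the rewrite author's own statement) =====
-- stated objective: idiomatic
-- what changed: B precomputes a translation table from the distinct characters of phrase (a dict comprehension over set(phrase)) and applies it with str.translate in one library pass, replacing A's per-character branch with repeated string concatenation.
import Mathlib
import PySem

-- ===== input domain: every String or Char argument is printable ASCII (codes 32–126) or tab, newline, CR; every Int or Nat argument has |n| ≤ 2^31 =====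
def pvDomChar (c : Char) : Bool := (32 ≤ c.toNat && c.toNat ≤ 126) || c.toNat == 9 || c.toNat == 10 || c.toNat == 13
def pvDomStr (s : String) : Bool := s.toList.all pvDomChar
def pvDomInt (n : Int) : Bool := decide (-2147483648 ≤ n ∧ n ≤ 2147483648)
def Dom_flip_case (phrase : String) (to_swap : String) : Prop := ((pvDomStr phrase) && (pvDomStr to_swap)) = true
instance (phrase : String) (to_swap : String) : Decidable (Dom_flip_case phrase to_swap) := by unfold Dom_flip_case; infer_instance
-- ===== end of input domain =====

-- B replaces A's per-character branch-and-append loop by a translation table built once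
-- from the distinct characters of phrase and applied in a single pass (idiomatic; same cost).

-- ===== PORT A =====
-- one character's str.swapcase() (exact on the ASCII domain)
def pySwapChar (c : Char) : Char :=
  if PySem.Chars.isupper c then PySem.Chars.lowerChar c
  else if PySem.Chars.islower c then PySem.Chars.upperChar c
  else c

def flip_case (phrase : String) (to_swap : String) : String :=
  let to_swap_low := PySem.Chars.lower to_swap.toList
  String.ofList (phrase.toList.foldl
    (fun output c =>
      if PySem.Chars.lower [c] = to_swap_low then output ++ [pySwapChar c]
      else output ++ [c]) [])

-- ===== PORT B =====
-- dict comprehension over set(phrase) (keyed by the character itself; ord is injective),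
-- then phrase.translate(table): per-character lookup with the character as default.
def flip_case_alt (phrase : String) (to_swap : String) : String :=
  let tsl := PySem.Chars.lower to_swap.toList
  let table : PySem.Dict Char (List Char) :=
    (PySem.Set.ofList phrase.toList).foldl
      (fun d c => if PySem.Chars.lower [c] = tsl then d.insert c [pySwapChar c] else d)
      PySem.Dict.empty
  String.ofList (phrase.toList.flatMap (fun c => table.getD c [c]))

-- ===== PRECONDITION & SPEC =====
def Spec_flip_case (phrase : String) (to_swap : String) (out : String) : Prop := out = flip_case_alt phrase to_swap
instance (phrase : String) (to_swap : String) (out : String) : Decidable (Spec_flip_case phrase to_swap out) := by unfold Spec_flip_case; infer_instance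

-- ===== CLAIM (what is proved, stated in full; the proofs are below) =====
def Claim_equal_flip_case : Prop := ∀ (phrase : String) (to_swap : String), Dom_flip_case phrase to_swap → Spec_flip_case phrase to_swap (flip_case phrase to_swap)

-- ===== LEMMAS AND PROOFS =====

-- looking up c in the table built over cs: the table entry if c was inserted, the default otherwise
theorem getD_build (cs : List Char) (d : PySem.Dict Char (List Char)) (c : Char) (tsl : List Char) :
    ((cs.foldl (fun d c => if PySem.Chars.lower [c] = tsl then d.insert c [pySwapChar c] else d) d).getD c [c])
      = if c ∈ cs ∧ PySem.Chars.lower [c] = tsl then [pySwapChar c] else d.getD c [c] := by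
  induction cs generalizing d with
  | nil => simp
  | cons c' cs ih =>
    simp only [List.foldl_cons, ih, List.mem_cons]
    by_cases hc : c ∈ cs ∧ PySem.Chars.lower [c] = tsl
    · simp [hc.1, hc.2]
    · simp only [if_neg hc]
      by_cases he : c = c'
      · subst he
        by_cases hl : PySem.Chars.lower [c] = tsl
        · simp [hl, PySem.Dict.getD_insert_self]
        · simp [hl]
      · by_cases hl : PySem.Chars.lower [c'] = tsl
        · simp only [if_pos hl, PySem.Dict.getD_insert, if_neg he]
          have hor : ((c = c' ∨ c ∈ cs) ∧ PySem.Chars.lower [c] = tsl) ↔ (c ∈ cs ∧ PySem.Chars.lower [c] = tsl) := by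
            constructor
            · rintro ⟨h1 | h1, h2⟩
              · exact absurd h1 he
              · exact ⟨h1, h2⟩
            · exact fun ⟨h1, h2⟩ => ⟨Or.inr h1, h2⟩
          rw [if_neg (by rw [hor]; exact hc)]
        · rw [if_neg hl]
          have hor : ((c = c' ∨ c ∈ cs) ∧ PySem.Chars.lower [c] = tsl) ↔ (c ∈ cs ∧ PySem.Chars.lower [c] = tsl) := by
            constructor
            · rintro ⟨h1 | h1, h2⟩
              · exact absurd h1 he
              · exact ⟨h1, h2⟩
            · exact fun ⟨h1, h2⟩ => ⟨Or.inr h1, h2⟩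
          rw [if_neg (by rw [hor]; exact hc)]

theorem flip_case_spec : Claim_equal_flip_case := by
  intro phrase to_swap _
  unfold Spec_flip_case flip_case flip_case_alt
  -- turn A's two-branch append into an append of a branch, then into a flatMap
  have hbody : ∀ (o : List Char) (c : Char),
      (if PySem.Chars.lower [c] = PySem.Chars.lower to_swap.toList then o ++ [pySwapChar c] else o ++ [c])
        = o ++ (if PySem.Chars.lower [c] = PySem.Chars.lower to_swap.toList then [pySwapChar c] else [c]) := by
    intro o c; split_ifs <;> rfl
  simp only [hbody]
  rw [PySem.List.foldl_append_eq_flatMap]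
  simp only [List.nil_append]
  refine congrArg String.ofList ?_
  -- pointwise: for c ∈ phrase the table lookup is exactly A's branch
  refine List.flatMap_congr ?_
  intro c hc
  rw [getD_build]
  have hmem : c ∈ PySem.Set.ofList phrase.toList := (PySem.Set.mem_ofList _ _).mpr hc
  by_cases hl : PySem.Chars.lower [c] = PySem.Chars.lower to_swap.toList
  · simp [hl, hmem]
  · simp [hl]
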